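-- pv_equiv track=rewrite | github.com/yantavares/simulador-redes-TR1 | transmissor.py | bipolar_coder
-- ===== SOURCE A (Python) =====
-- def bipolar_coder(bit_array):
--     output = bit_array.copy()
--     flip = False
--     for i, bit in enumerate(output):
--         if bit == 1 and not flip:
--             output[i] = 1
--             flip = not flip
--         elif bit == 1 and flip:
--             output[i] = -1
--             flip = not flip
--     return output
-- ===== SOURCE B (Python) =====
-- def bipolar_coder(bit_array):
--     # two-phase: collect positions of 1s, then assign 1/-1 by ordinal parity
--     ones = [i for i, bit in enumerate(bit_array) if bit == 1]
--     output = list(bit_array)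
--     for k, i in enumerate(ones):
--         output[i] = 1 if k % 2 == 0 else -1
--     return output
-- ===== Notes on version B (the rewrite author's own statement) =====
-- stated objective: alternative
-- what changed: Replaces the single toggle-carrying in-place sweep with a two-phase structure: first collect the indices of all 1-bits, then assign 1 or -1 to each by the parity of its ordinal among the 1s, leaving other elements untouched.
import Mathlib
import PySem

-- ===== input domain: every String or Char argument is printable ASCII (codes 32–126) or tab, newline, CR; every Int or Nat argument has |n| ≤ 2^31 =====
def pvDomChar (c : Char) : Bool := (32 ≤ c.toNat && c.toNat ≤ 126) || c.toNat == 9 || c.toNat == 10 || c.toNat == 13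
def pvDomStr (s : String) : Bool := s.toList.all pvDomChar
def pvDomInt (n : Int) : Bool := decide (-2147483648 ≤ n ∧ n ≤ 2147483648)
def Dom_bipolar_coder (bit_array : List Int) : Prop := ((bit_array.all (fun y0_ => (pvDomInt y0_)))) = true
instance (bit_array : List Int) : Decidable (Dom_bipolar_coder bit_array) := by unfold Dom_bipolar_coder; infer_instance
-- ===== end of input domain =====

-- B replaces A's toggle-carrying in-place sweep by a two-phase "collect the 1-positions, then assign 1/-1 by ordinal parity" decomposition (alternative structure, same asymptotic cost).

-- ===== PORT A =====
-- single sweep over enumerate(output) with a flip flag, writing in place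
def bipolar_coder (bit_array : List Int) : List Int :=
  let output := bit_array
  ((PySem.List.enumerate output 0).foldl
    (fun (st : List Int × Bool) p =>
      if p.2 = 1 ∧ st.2 = false then (PySem.List.pySetD st.1 p.1 1, !st.2)
      else if p.2 = 1 ∧ st.2 = true then (PySem.List.pySetD st.1 p.1 (-1), !st.2)
      else st)
    (output, false)).1

-- ===== PORT B =====
-- phase 1: indices of the 1-bits; phase 2: assign 1/-1 by ordinal parity on a copy
def bipolar_coder_alt (bit_array : List Int) : List Int :=
  let ones : List Int :=
    (PySem.List.enumerate bit_array 0).filterMap (fun p => if p.2 = 1 then some p.1 else none)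
  let output := bit_array
  (PySem.List.enumerate ones 0).foldl
    (fun o p => PySem.List.pySetD o p.2 (if PySem.Int.mod p.1 2 = 0 then 1 else -1))
    output

-- ===== PRECONDITION & SPEC =====
def Spec_bipolar_coder (bit_array : List Int) (out : List Int) : Prop := out = bipolar_coder_alt bit_array
instance (bit_array : List Int) (out : List Int) : Decidable (Spec_bipolar_coder bit_array out) := by unfold Spec_bipolar_coder; infer_instance

-- ===== CLAIM (what is proved, stated in full; the proofs are below) =====
def Claim_equal_bipolar_coder : Prop := ∀ (bit_array : List Int), Dom_bipolar_coder bit_array → Spec_bipolar_coder bit_array (bipolar_coder bit_array)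

-- ===== LEMMAS AND PROOFS =====

-- reference value: structural alternation; flip = "next 1 becomes -1"
def pvRef (xs : List Int) (flip : Bool) : List Int :=
  match xs with
  | [] => []
  | b :: rest =>
    if b = 1 then (if flip then -1 else 1) :: pvRef rest (!flip)
    else b :: pvRef rest flip

theorem pvRef_cons (b : Int) (rest : List Int) (flip : Bool) :
    pvRef (b :: rest) flip
      = if b = 1 then (if flip then -1 else 1) :: pvRef rest (!flip)
        else b :: pvRef rest flip := rfl

theorem pv_set_length_append (pre : List Int) (b v : Int) (rest : List Int) :
    (pre ++ b :: rest).set pre.length v = pre ++ v :: rest := by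
  induction pre with
  | nil => rfl
  | cons a pre ih => simp [ih]

-- A's sweep, generalized over an already-processed prefix
theorem pvA_fold (xs : List Int) : ∀ (pre : List Int) (flip : Bool),
    ((PySem.List.enumerate xs (pre.length : Int)).foldl
      (fun (st : List Int × Bool) p =>
        if p.2 = 1 ∧ st.2 = false then (PySem.List.pySetD st.1 p.1 1, !st.2)
        else if p.2 = 1 ∧ st.2 = true then (PySem.List.pySetD st.1 p.1 (-1), !st.2)
        else st)
      (pre ++ xs, flip)).1 = pre ++ pvRef xs flip := by
  induction xs with
  | nil => intro pre flip; simp [PySem.List.enumerate_nil, pvRef]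
  | cons b rest ih =>
    intro pre flip
    rw [PySem.List.enumerate_cons, pvRef_cons]
    by_cases hb : b = 1
    · subst hb
      cases flip with
      | false =>
        simp only [List.foldl_cons, PySem.List.pySetD_natCast]
        norm_num [pv_set_length_append]
        rw [show pre ++ (1:Int) :: rest = (pre ++ [(1:Int)]) ++ rest by simp]
        rw [show ((pre.length : Int) + 1) = (((pre ++ [(1:Int)]).length : Nat) : Int) by simp]
        rw [ih (pre ++ [(1:Int)]) true]
        simp
      | true =>
        simp only [List.foldl_cons, PySem.List.pySetD_natCast]
        norm_num [pv_set_length_append]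
        rw [show pre ++ (-1:Int) :: rest = (pre ++ [(-1:Int)]) ++ rest by simp]
        rw [show ((pre.length : Int) + 1) = (((pre ++ [(-1:Int)]).length : Nat) : Int) by simp]
        rw [ih (pre ++ [(-1:Int)]) false]
        simp
    · have hc1 : ¬ (b = 1 ∧ flip = false) := fun h => hb h.1
      have hc2 : ¬ (b = 1 ∧ flip = true) := fun h => hb h.1
      simp only [List.foldl_cons, if_neg hc1, if_neg hc2, if_neg hb]
      rw [show pre ++ b :: rest = (pre ++ [b]) ++ rest by simp]
      rw [show ((pre.length : Int) + 1) = (((pre ++ [b]).length : Nat) : Int) by simp]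
      rw [ih (pre ++ [b]) flip]
      simp

theorem pv_parity_flip (c : Int) :
    (PySem.Int.mod (c + 1) 2 = 0) ↔ ¬ (PySem.Int.mod c 2 = 0) := by
  rw [PySem.Int.mod_eq_emod_of_pos (by norm_num), PySem.Int.mod_eq_emod_of_pos (by norm_num)]
  omega

-- B's assignment pass, generalized over an untouched prefix and the ordinal start
theorem pvB_fold (xs : List Int) : ∀ (pre : List Int) (c : Int),
    (PySem.List.enumerate
        ((PySem.List.enumerate xs (pre.length : Int)).filterMap
          (fun p => if p.2 = 1 then some p.1 else none)) c).foldl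
      (fun o p => PySem.List.pySetD o p.2 (if PySem.Int.mod p.1 2 = 0 then 1 else -1))
      (pre ++ xs)
    = pre ++ pvRef xs (decide (¬ PySem.Int.mod c 2 = 0)) := by
  induction xs with
  | nil => intro pre c; simp [PySem.List.enumerate_nil, pvRef]
  | cons b rest ih =>
    intro pre c
    rw [PySem.List.enumerate_cons, pvRef_cons]
    by_cases hb : b = 1
    · subst hb
      simp only [List.filterMap_cons, reduceIte]
      rw [PySem.List.enumerate_cons]
      simp only [List.foldl_cons, PySem.List.pySetD_natCast, pv_set_length_append]
      set v : Int := if PySem.Int.mod c 2 = 0 then 1 else -1 with hv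
      rw [show pre ++ v :: rest = (pre ++ [v]) ++ rest by simp]
      rw [show ((pre.length : Int) + 1) = (((pre ++ [v]).length : Nat) : Int) by simp]
      rw [ih (pre ++ [v]) (c + 1)]
      have hpar : (decide (¬ PySem.Int.mod (c + 1) 2 = 0))
          = !(decide (¬ PySem.Int.mod c 2 = 0)) := by
        by_cases h : PySem.Int.mod c 2 = 0
        · have h2 : ¬ PySem.Int.mod (c + 1) 2 = 0 := fun hh => (pv_parity_flip c).mp hh h
          rw [decide_eq_true h2, decide_eq_false (not_not_intro h)]; rfl
        · have h2 : PySem.Int.mod (c + 1) 2 = 0 := (pv_parity_flip c).mpr h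
          rw [decide_eq_false (not_not_intro h2), decide_eq_true h]; rfl
      rw [hpar, hv]
      by_cases h : PySem.Int.mod c 2 = 0
      · rw [if_pos h, decide_eq_false (not_not_intro h)]
        simp only [List.append_assoc, List.singleton_append, Bool.false_eq_true, if_false]
      · rw [if_neg h, decide_eq_true h]
        simp only [List.append_assoc, List.singleton_append, if_true]
    · simp only [List.filterMap_cons, if_neg hb]
      rw [show pre ++ b :: rest = (pre ++ [b]) ++ rest by simp]
      rw [show ((pre.length : Int) + 1) = (((pre ++ [b]).length : Nat) : Int) by simp]
      rw [ih (pre ++ [b]) c]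
      simp

-- ===== VERDICT (by name: the statement is the Claim_ definition above) =====
theorem bipolar_coder_spec : Claim_equal_bipolar_coder := by
  intro bit_array _
  unfold Spec_bipolar_coder bipolar_coder bipolar_coder_alt
  have hA := pvA_fold bit_array [] false
  have hB := pvB_fold bit_array [] 0
  simp only [List.length_nil, Nat.cast_zero, List.nil_append] at hA hB
  rw [hA]
  rw [show (decide (¬ PySem.Int.mod 0 2 = 0)) = false by
    rw [PySem.Int.mod_eq_emod_of_pos (by norm_num)]; simp] at hB
  exact hB.symm
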